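-- pv_equiv track=rewrite | github.com/datalab-georgetown/topic_modeling | percolate_setup.py | get_tuple_counts_with_whitelist
-- ===== SOURCE A (Python) =====
-- def get_tuple_counts_with_whitelist(tuples, whitelist):
--     '''
--
--     :param tuples: with cofreqeuncies
--     :param whitelist:
--     :return: only tuples that include a word in the whitelist,
--         along with the tuple cofrequency
--     '''
--     wl_tuples = []
--     for (t1, t2), v in tuples:
--         for wl_word in whitelist:
--             if wl_word in t1 or wl_word in t2:
--                 wl_tuples.append(((t1, t2), v))
--                 break
--     return wl_tuples
-- ===== SOURCE B (Python) =====
-- def get_tuple_counts_with_whitelist(tuples, whitelist):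
--     keep = [False] * len(tuples)
--     for wl_word in whitelist:
--         keep = [k or wl_word in t1 or wl_word in t2
--                 for k, ((t1, t2), v) in zip(keep, tuples)]
--     return [t for t, k in zip(tuples, keep) if k]
-- ===== Notes on version B (the rewrite author's own statement) =====
-- stated objective: alternative
-- what changed: B swaps the loop nesting: instead of scanning the whitelist per tuple with an early break, it sweeps the tuple list once per whitelist word, OR-ing matches into a boolean keep-mask, and filters the tuples by the mask at the end.
import Mathlib
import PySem

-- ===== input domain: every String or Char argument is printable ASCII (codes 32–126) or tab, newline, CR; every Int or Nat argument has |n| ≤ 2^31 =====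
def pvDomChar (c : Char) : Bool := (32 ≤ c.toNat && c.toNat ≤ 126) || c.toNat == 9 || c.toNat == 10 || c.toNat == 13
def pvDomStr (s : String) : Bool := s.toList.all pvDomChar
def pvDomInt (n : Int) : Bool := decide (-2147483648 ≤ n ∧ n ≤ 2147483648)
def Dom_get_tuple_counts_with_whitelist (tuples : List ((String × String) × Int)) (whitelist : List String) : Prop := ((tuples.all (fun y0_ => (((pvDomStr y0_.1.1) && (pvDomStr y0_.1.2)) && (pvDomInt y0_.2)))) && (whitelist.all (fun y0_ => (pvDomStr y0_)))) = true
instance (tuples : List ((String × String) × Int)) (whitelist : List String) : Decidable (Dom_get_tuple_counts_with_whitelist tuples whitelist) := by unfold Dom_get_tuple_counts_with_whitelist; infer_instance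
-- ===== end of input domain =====

-- B swaps the loop nesting: one sweep over the tuples per whitelist word, OR-ing into a boolean keep-mask,
-- then a single filter by the mask — an alternative traversal order, not claimed faster.
-- ===== PORT A =====
-- inner 'for wl_word in whitelist: ... break' loop: true iff some word matched (then A appends once and breaks)
def aHit (t1 t2 : String) : List String → Bool
  | [] => false
  | w :: ws => if PySem.Str.isIn w t1 || PySem.Str.isIn w t2 then true else aHit t1 t2 ws

def get_tuple_counts_with_whitelist (tuples : List ((String × String) × Int)) (whitelist : List String) : List ((String × String) × Int) :=
  tuples.foldl (fun wl_tuples p => if aHit p.1.1 p.1.2 whitelist then wl_tuples ++ [p] else wl_tuples) []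

-- ===== PORT B =====
def get_tuple_counts_with_whitelist_alt (tuples : List ((String × String) × Int)) (whitelist : List String) : List ((String × String) × Int) :=
  let keep0 := List.replicate tuples.length false
  let keep := whitelist.foldl (fun k w =>
    (k.zip tuples).map (fun kp => kp.1 || PySem.Str.isIn w kp.2.1.1 || PySem.Str.isIn w kp.2.1.2)) keep0
  ((tuples.zip keep).filter (fun tk => tk.2)).map (fun tk => tk.1)

-- ===== PRECONDITION & SPEC =====
def Spec_get_tuple_counts_with_whitelist (tuples : List ((String × String) × Int)) (whitelist : List String) (out : List ((String × String) × Int)) : Prop := out = get_tuple_counts_with_whitelist_alt tuples whitelist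
instance (tuples : List ((String × String) × Int)) (whitelist : List String) (out : List ((String × String) × Int)) : Decidable (Spec_get_tuple_counts_with_whitelist tuples whitelist out) := by unfold Spec_get_tuple_counts_with_whitelist; infer_instance

-- ===== CLAIM (what is proved, stated in full; the proofs are below) =====
def Claim_equal_get_tuple_counts_with_whitelist : Prop := ∀ (tuples : List ((String × String) × Int)) (whitelist : List String), Dom_get_tuple_counts_with_whitelist tuples whitelist → Spec_get_tuple_counts_with_whitelist tuples whitelist (get_tuple_counts_with_whitelist tuples whitelist)

-- ===== LEMMAS AND PROOFS =====

theorem aHit_eq_any (t1 t2 : String) (ws : List String) :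
    aHit t1 t2 ws = ws.any (fun w => PySem.Str.isIn w t1 || PySem.Str.isIn w t2) := by
  induction ws with
  | nil => rfl
  | cons w ws ih =>
    cases h : (PySem.Str.isIn w t1 || PySem.Str.isIn w t2) <;>
      simp [aHit, h, ih, -PySem.Str.isIn_eq]

theorem replicate_len_eq_map_false (tuples : List ((String × String) × Int)) :
    List.replicate tuples.length false = tuples.map (fun _ => false) := by
  induction tuples with
  | nil => rfl
  | cons p ps ih => rw [List.length_cons, List.replicate_succ, ih, List.map_cons]

theorem zip_map_map {α : Type} (l : List α) (f : α → Bool) (g : Bool × α → Bool) :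
    ((l.map f).zip l).map g = l.map (fun p => g (f p, p)) := by
  induction l with
  | nil => rfl
  | cons x xs ih => simp [ih]

-- the whitelist fold over a keep-mask of the form 'map f tuples' stays of that form
theorem keepFold_lemma (tuples : List ((String × String) × Int)) (ws : List String)
    (f : (String × String) × Int → Bool) (h : List.replicate tuples.length false = tuples.map f) :
    ws.foldl (fun k w =>
      (k.zip tuples).map (fun kp => kp.1 || PySem.Str.isIn w kp.2.1.1 || PySem.Str.isIn w kp.2.1.2))
      (List.replicate tuples.length false)
    = tuples.map (fun p => f p || ws.any (fun w => PySem.Str.isIn w p.1.1 || PySem.Str.isIn w p.1.2)) := by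
  rw [h]; clear h
  induction ws generalizing f with
  | nil => simp
  | cons w ws ih =>
    simp only [List.foldl_cons, List.any_cons]
    rw [zip_map_map]
    rw [ih (fun p => f p || PySem.Str.isIn w p.1.1 || PySem.Str.isIn w p.1.2)]
    apply List.map_congr_left
    intro p _
    cases f p <;> cases PySem.Str.isIn w p.1.1 <;> cases PySem.Str.isIn w p.1.2 <;> rfl

theorem zip_map_filter_lemma (tuples : List ((String × String) × Int))
    (q : (String × String) × Int → Bool) :
    (((tuples.zip (tuples.map q)).filter (fun tk => tk.2)).map (fun tk => tk.1))
    = tuples.filter q := by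
  induction tuples with
  | nil => rfl
  | cons p ps ih =>
    simp only [List.map_cons, List.zip_cons_cons, List.filter_cons]
    cases hq : q p <;> simp [ih]

-- ===== VERDICT (by name: the statement is the Claim_ definition above) =====
theorem get_tuple_counts_with_whitelist_spec : Claim_equal_get_tuple_counts_with_whitelist := by
  intro tuples whitelist _
  unfold Spec_get_tuple_counts_with_whitelist get_tuple_counts_with_whitelist get_tuple_counts_with_whitelist_alt
  rw [PySem.List.foldl_append_if_eq_filter]
  simp only [List.nil_append]
  rw [keepFold_lemma tuples whitelist (fun _ => false) (replicate_len_eq_map_false tuples),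
    zip_map_filter_lemma]
  exact List.filter_congr (fun p _ => by
    rw [aHit_eq_any]; exact (Bool.false_or _).symm)
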